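-- pv_equiv track=rewrite | github.com/henry-tujia/LeetCode | alg2.py | is_corr
-- ===== SOURCE A (Python) =====
-- def is_corr(nums):
--     temp = 0
--     for i in range(len(nums)):
--         for j in range(i, len(nums)):
--             if temp > 1:
--                 return False
--             if nums[i] > nums[j]:
--                 temp += 1
--     if temp == 1:
--         return True
--     return False
-- ===== SOURCE B (Python) =====
-- def is_corr(nums):
--     # Linear scan: find the first adjacent descent, check its neighbours,
--     # and require the remainder to be sorted (= exactly one inversion pair).
--     n = len(nums)
--     prev = None
--     for i in range(n - 1):
--         x, y = nums[i], nums[i + 1]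
--         if x > y:
--             left_ok = prev is None or prev <= y
--             right_ok = i + 2 == n or x <= nums[i + 2]
--             return left_ok and right_ok and all(nums[j] <= nums[j + 1] for j in range(i + 1, n - 1))
--         prev = x
--     return False
-- ===== Notes on version B (the rewrite author's own statement) =====
-- stated objective: faster
-- what changed: Replaced the quadratic all-pairs inversion counter (with early return) by a single linear scan that finds the first adjacent descent, checks its two neighbour values, and verifies the remainder is sorted.
import Mathlib
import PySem

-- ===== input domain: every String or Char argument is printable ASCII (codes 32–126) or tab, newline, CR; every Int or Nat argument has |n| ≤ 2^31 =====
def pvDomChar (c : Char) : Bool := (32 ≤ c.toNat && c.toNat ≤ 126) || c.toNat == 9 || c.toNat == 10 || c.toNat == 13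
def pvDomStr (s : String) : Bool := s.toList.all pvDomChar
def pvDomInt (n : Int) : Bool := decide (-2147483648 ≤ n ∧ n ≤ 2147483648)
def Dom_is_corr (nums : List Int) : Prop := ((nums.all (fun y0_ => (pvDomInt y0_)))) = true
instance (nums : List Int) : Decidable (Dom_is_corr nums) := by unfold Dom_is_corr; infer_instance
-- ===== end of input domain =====

-- B replaces A's O(n^2) all-pairs inversion count by a single O(n) scan
-- (first adjacent descent + neighbour checks + sortedness of the rest).

-- ===== PORT A =====
-- inner loop: for j in range(i, len(nums)): check temp > 1 (early False = none), count nums[i] > nums[j]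
def pvInnerA (x : Int) (js : List Int) (temp : Nat) : Option Nat :=
  match js with
  | [] => some temp
  | y :: ys => if temp > 1 then none else pvInnerA x ys (if x > y then temp + 1 else temp)

-- outer loop: for i in range(len(nums)), iterating the inner loop over the suffix nums[i:]
def pvOuterA : List Int → Nat → Option Nat
  | [], temp => some temp
  | x :: xs, temp =>
    match pvInnerA x (x :: xs) temp with
    | none => none
    | some t => pvOuterA xs t

def is_corr (nums : List Int) : Bool :=
  match pvOuterA nums 0 with
  | none => false
  | some t => t == 1

-- ===== PORT B =====
-- all(nums[j] <= nums[j+1] for j in range(i+1, n-1)) over the suffix starting at i+1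
def pvSortedAdj : List Int → Bool
  | x :: y :: rest => decide (x ≤ y) && pvSortedAdj (y :: rest)
  | _ => true

-- the scan loop of Source B: prev carries nums[i-1] (None before the first step)
def pvFindB (prev : Option Int) : List Int → Bool
  | x :: y :: rest =>
    if x > y then
      (match prev with | none => true | some p => decide (p ≤ y)) &&
      (match rest with | [] => true | z :: _ => decide (x ≤ z)) &&
      pvSortedAdj (y :: rest)
    else pvFindB (some x) (y :: rest)
  | _ => false

def is_corr_alt (nums : List Int) : Bool := pvFindB none nums

-- ===== PRECONDITION & SPEC =====
def Spec_is_corr (nums : List Int) (out : Bool) : Prop := out = is_corr_alt nums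
instance (nums : List Int) (out : Bool) : Decidable (Spec_is_corr nums out) := by unfold Spec_is_corr; infer_instance

-- ===== CLAIM (what is proved, stated in full; the proofs are below) =====
def Claim_equal_is_corr : Prop := ∀ (nums : List Int), Dom_is_corr nums → Spec_is_corr nums (is_corr nums)

-- ===== LEMMAS AND PROOFS =====

-- how many elements of l are smaller than x
def pvCnt (x : Int) (l : List Int) : Nat := l.countP (fun y => decide (x > y))

-- number of inversion pairs (i < j with nums[i] > nums[j])
def pvInvCount : List Int → Nat
  | [] => 0
  | x :: xs => pvCnt x xs + pvInvCount xs

-- inversions between a prefix and a suffix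
def pvCross (l1 l2 : List Int) : Nat := (l1.map (fun a => pvCnt a l2)).sum

theorem pvCnt_nil (x : Int) : pvCnt x [] = 0 := rfl

theorem pvCnt_cons (x y : Int) (ys : List Int) :
    pvCnt x (y :: ys) = pvCnt x ys + (if x > y then 1 else 0) := by
  by_cases h : x > y <;> simp [pvCnt, h]

theorem pvCnt_eq_zero (x : Int) (l : List Int) : pvCnt x l = 0 ↔ ∀ y ∈ l, x ≤ y := by
  unfold pvCnt
  rw [List.countP_eq_zero]
  constructor
  · intro h y hy; have := h y hy; simp at this; exact this
  · intro h y hy; simpa using h y hy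

theorem pvCnt_append (x : Int) (l1 l2 : List Int) :
    pvCnt x (l1 ++ l2) = pvCnt x l1 + pvCnt x l2 := by
  simp [pvCnt, List.countP_append]

theorem pvInvCount_append (l1 l2 : List Int) :
    pvInvCount (l1 ++ l2) = pvInvCount l1 + pvCross l1 l2 + pvInvCount l2 := by
  induction l1 with
  | nil => simp [pvInvCount, pvCross]
  | cons a t ih =>
    simp only [List.cons_append, pvInvCount, pvCnt_append, ih, pvCross, List.map_cons,
      List.sum_cons]
    omega

theorem pvInvCount_eq_zero_iff (l : List Int) :
    pvInvCount l = 0 ↔ List.Pairwise (· ≤ ·) l := by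
  induction l with
  | nil => simp [pvInvCount]
  | cons x xs ih =>
    simp only [pvInvCount, Nat.add_eq_zero_iff, ih, List.pairwise_cons, pvCnt_eq_zero]

theorem pvCross_eq_zero_iff (l1 l2 : List Int) :
    pvCross l1 l2 = 0 ↔ ∀ a ∈ l1, ∀ z ∈ l2, a ≤ z := by
  unfold pvCross
  rw [List.sum_eq_zero_iff]
  constructor
  · intro h a ha z hz
    exact (pvCnt_eq_zero a l2).mp (h _ (List.mem_map_of_mem ha)) z hz
  · intro h c hc
    obtain ⟨a, ha, rfl⟩ := List.mem_map.mp hc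
    exact (pvCnt_eq_zero a l2).mpr (h a ha)

theorem pvSortedAdj_iff (l : List Int) :
    pvSortedAdj l = true ↔ List.Pairwise (· ≤ ·) l := by
  induction l with
  | nil => simp [pvSortedAdj]
  | cons x xs ih =>
    cases xs with
    | nil => simp [pvSortedAdj]
    | cons y rest =>
      simp only [pvSortedAdj, Bool.and_eq_true, decide_eq_true_eq, ih, List.pairwise_cons]
      constructor
      · rintro ⟨hxy, hy, hrest⟩
        refine ⟨?_, hy, hrest⟩
        intro z hz
        rcases List.mem_cons.mp hz with rfl | hz'
        · exact hxy
        · exact le_trans hxy (hy z hz')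
      · rintro ⟨hx, hy, hrest⟩
        exact ⟨hx y (by simp), hy, hrest⟩

-- ===== A-side characterisation: is_corr l = (pvInvCount l == 1) =====

theorem pvInnerA_cases (x : Int) (js : List Int) (temp : Nat) :
    pvInnerA x js temp = some (temp + pvCnt x js) ∨
    (pvInnerA x js temp = none ∧ 2 ≤ temp + pvCnt x js) := by
  induction js generalizing temp with
  | nil => simp [pvInnerA, pvCnt_nil]
  | cons y ys ih =>
    rw [pvCnt_cons]
    by_cases ht : temp > 1
    · right
      refine ⟨by simp [pvInnerA, ht], by split_ifs <;> omega⟩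
    · by_cases hxy : x > y
      · have hstep : pvInnerA x (y :: ys) temp = pvInnerA x ys (temp + 1) := by
          simp [pvInnerA, ht, hxy]
        rw [hstep, if_pos hxy]
        rcases ih (temp + 1) with h | ⟨h1, h2⟩
        · left; rw [h]; exact congrArg some (by omega)
        · right; exact ⟨h1, by omega⟩
      · have hstep : pvInnerA x (y :: ys) temp = pvInnerA x ys temp := by
          simp [pvInnerA, ht, hxy]
        rw [hstep, if_neg hxy]
        rcases ih temp with h | ⟨h1, h2⟩
        · left; rw [h]; exact congrArg some (by omega)
        · right; exact ⟨h1, by omega⟩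

theorem pvOuterA_cases (l : List Int) (temp : Nat) :
    pvOuterA l temp = some (temp + pvInvCount l) ∨
    (pvOuterA l temp = none ∧ 2 ≤ temp + pvInvCount l) := by
  induction l generalizing temp with
  | nil => simp [pvOuterA, pvInvCount]
  | cons x xs ih =>
    have hc : pvCnt x (x :: xs) = pvCnt x xs := by
      rw [pvCnt_cons]; simp
    rcases pvInnerA_cases x (x :: xs) temp with h | ⟨h1, h2⟩
    · rw [hc] at h
      rcases ih (temp + pvCnt x xs) with h' | ⟨h1', h2'⟩
      · left
        simp only [pvOuterA, h, h', pvInvCount]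
        exact congrArg some (by omega)
      · right
        refine ⟨by simp [pvOuterA, h, h1'], ?_⟩
        simp only [pvInvCount]; omega
    · rw [hc] at h2
      right
      refine ⟨by simp [pvOuterA, h1], ?_⟩
      simp only [pvInvCount]; omega

theorem is_corr_eq_invCount (l : List Int) : is_corr l = (pvInvCount l == 1) := by
  unfold is_corr
  rcases pvOuterA_cases l 0 with h | ⟨h1, h2⟩
  · rw [h]; simp
  · rw [h1]
    have : pvInvCount l ≠ 1 := by omega
    simp [this]

-- ===== B-side characterisation =====

theorem pvInvCount_desc (x y : Int) (rest : List Int) (hxy : x > y) :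
    pvInvCount (x :: y :: rest) = 1 + pvCnt x rest + pvInvCount (y :: rest) := by
  simp only [pvInvCount, pvCnt_cons, if_pos hxy]
  omega

theorem pvFindB_some (xs : List Int) :
    ∀ (ctx : List Int) (p : Int),
      List.Pairwise (· ≤ ·) ctx → p ∈ ctx → (∀ a ∈ ctx, a ≤ p) →
      (∀ x ∈ xs.head?, p ≤ x) →
      pvFindB (some p) xs = (pvInvCount (ctx ++ xs) == 1) := by
  induction xs with
  | nil =>
    intro ctx p hp _ _ _
    have : pvInvCount ctx = 0 := (pvInvCount_eq_zero_iff ctx).mpr hp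
    simp [pvFindB, this]
  | cons x xs ih =>
    intro ctx p hp hmem hmax hhead
    have hpx : p ≤ x := hhead x (by simp)
    cases xs with
    | nil =>
      have hsorted : List.Pairwise (· ≤ ·) (ctx ++ [x]) := by
        rw [List.pairwise_append]
        exact ⟨hp, by simp, fun a ha z hz => by simp at hz; subst hz; exact le_trans (hmax a ha) hpx⟩
      have : pvInvCount (ctx ++ [x]) = 0 := (pvInvCount_eq_zero_iff _).mpr hsorted
      simp [pvFindB, this]
    | cons y rest =>
      by_cases hxy : x > y
      · -- descent found here
        simp only [pvFindB, if_pos hxy]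
        have hctx0 : pvInvCount ctx = 0 := (pvInvCount_eq_zero_iff ctx).mpr hp
        rw [pvInvCount_append, hctx0, pvInvCount_desc x y rest hxy]
        by_cases hs : List.Pairwise (· ≤ ·) (y :: rest)
        · have hyz : ∀ z ∈ rest, y ≤ z := (List.pairwise_cons.mp hs).1
          have hinv0 : pvInvCount (y :: rest) = 0 := (pvInvCount_eq_zero_iff _).mpr hs
          rw [hinv0]
          rw [Bool.eq_iff_iff]
          simp only [Bool.and_eq_true, beq_iff_eq, pvSortedAdj_iff]
          constructor
          · rintro ⟨⟨hl, hr⟩, -⟩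
            have hcross : pvCross ctx (x :: y :: rest) = 0 := by
              rw [pvCross_eq_zero_iff]
              intro a ha z hz
              have hap : a ≤ p := hmax a ha
              have hpy : p ≤ y := by simpa using hl
              rcases List.mem_cons.mp hz with rfl | hz'
              · exact le_trans hap hpx
              rcases List.mem_cons.mp hz' with rfl | hz''
              · exact le_trans hap hpy
              · exact le_trans (le_trans hap hpy) (hyz z hz'')
            have hcnt : pvCnt x rest = 0 := by
              rw [pvCnt_eq_zero]
              intro z hz
              cases rest with
              | nil => simp at hz
              | cons w ws =>
                have hxw : x ≤ w := by simpa using hr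
                have hwz : w ≤ z := by
                  rcases List.mem_cons.mp hz with rfl | hz'
                  · exact le_refl _
                  · exact ((List.pairwise_cons.mp (List.pairwise_cons.mp hs).2).1) z hz'
                exact le_trans hxw hwz
            omega
          · intro h
            have hcross0 : pvCross ctx (x :: y :: rest) = 0 := by omega
            have hcnt0 : pvCnt x rest = 0 := by omega
            refine ⟨⟨?_, ?_⟩, hs⟩
            · have := (pvCross_eq_zero_iff _ _).mp hcross0 p hmem y (by simp)
              simpa using this
            · cases rest with
              | nil => simp
              | cons w ws =>
                have := (pvCnt_eq_zero x (w :: ws)).mp hcnt0 w (by simp)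
                simpa using this
        · -- remainder not sorted: both sides false
          have hsb : pvSortedAdj (y :: rest) = false := by
            rw [← Bool.not_eq_true, pvSortedAdj_iff]; exact hs
          have hge : 1 ≤ pvInvCount (y :: rest) := by
            rcases Nat.eq_zero_or_pos (pvInvCount (y :: rest)) with h0 | h1
            · exact absurd ((pvInvCount_eq_zero_iff _).mp h0) hs
            · exact h1
          have hne : (0 + pvCross ctx (x :: y :: rest) +
              (1 + pvCnt x rest + pvInvCount (y :: rest)) == 1) = false := by
            simp only [beq_eq_false_iff_ne, ne_eq]
            omega
          rw [hne, hsb]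
          simp
      · -- no descent: step forward with ctx ++ [x]
        simp only [pvFindB, if_neg hxy]
        have hxy' : x ≤ y := not_lt.mp hxy
        have h1 : List.Pairwise (· ≤ ·) (ctx ++ [x]) := by
          rw [List.pairwise_append]
          exact ⟨hp, by simp, fun a ha z hz => by simp at hz; subst hz; exact le_trans (hmax a ha) hpx⟩
        have h2 : x ∈ ctx ++ [x] := by simp
        have h3 : ∀ a ∈ ctx ++ [x], a ≤ x := by
          intro a ha
          rcases List.mem_append.mp ha with h | h
          · exact le_trans (hmax a h) hpx
          · simp at h; subst h; exact le_refl _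
        have h4 : ∀ z ∈ (y :: rest).head?, x ≤ z := by
          intro z hz; simp at hz; subst hz; exact hxy'
        have := ih (ctx ++ [x]) x h1 h2 h3 h4
        rw [this, List.append_assoc]
        simp

theorem is_corr_alt_eq_invCount (l : List Int) : is_corr_alt l = (pvInvCount l == 1) := by
  unfold is_corr_alt
  cases l with
  | nil => simp [pvFindB, pvInvCount]
  | cons x xs =>
    cases xs with
    | nil => simp [pvFindB, pvInvCount, pvCnt_nil]
    | cons y rest =>
      by_cases hxy : x > y
      · simp only [pvFindB, if_pos hxy]
        rw [pvInvCount_desc x y rest hxy]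
        by_cases hs : List.Pairwise (· ≤ ·) (y :: rest)
        · have hinv0 : pvInvCount (y :: rest) = 0 := (pvInvCount_eq_zero_iff _).mpr hs
          rw [hinv0]
          rw [Bool.eq_iff_iff]
          simp only [Bool.and_eq_true, beq_iff_eq, pvSortedAdj_iff, Bool.true_and]
          constructor
          · rintro ⟨hr, -⟩
            have hcnt : pvCnt x rest = 0 := by
              rw [pvCnt_eq_zero]
              intro z hz
              cases rest with
              | nil => simp at hz
              | cons w ws =>
                have hxw : x ≤ w := by simpa using hr
                have hwz : w ≤ z := by
                  rcases List.mem_cons.mp hz with rfl | hz'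
                  · exact le_refl _
                  · exact ((List.pairwise_cons.mp (List.pairwise_cons.mp hs).2).1) z hz'
                exact le_trans hxw hwz
            omega
          · intro h
            have hcnt0 : pvCnt x rest = 0 := by omega
            refine ⟨?_, hs⟩
            cases rest with
            | nil => simp
            | cons w ws =>
              have := (pvCnt_eq_zero x (w :: ws)).mp hcnt0 w (by simp)
              simpa using this
        · have hsb : pvSortedAdj (y :: rest) = false := by
            rw [← Bool.not_eq_true, pvSortedAdj_iff]; exact hs
          have hge : 1 ≤ pvInvCount (y :: rest) := by
            rcases Nat.eq_zero_or_pos (pvInvCount (y :: rest)) with h0 | h1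
            · exact absurd ((pvInvCount_eq_zero_iff _).mp h0) hs
            · exact h1
          have hne : (1 + pvCnt x rest + pvInvCount (y :: rest) == 1) = false := by
            simp only [beq_eq_false_iff_ne, ne_eq]; omega
          rw [hne, hsb]
          simp
      · simp only [pvFindB, if_neg hxy]
        have := pvFindB_some (y :: rest) [x] x (by simp) (by simp) (by simp)
          (by intro z hz; simp at hz; subst hz; exact not_lt.mp hxy)
        rw [this]
        simp

-- ===== VERDICT (by name: the statement is the Claim_ definition above) =====
theorem is_corr_spec : Claim_equal_is_corr := by
  intro nums _
  unfold Spec_is_corr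
  rw [is_corr_eq_invCount, is_corr_alt_eq_invCount]
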